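-- pv_equiv track=rewrite | github.com/MYRADhub/SURA | agents/agent_rank_priority_bfs.py | resolve_conflicts
-- ===== SOURCE A (Python) =====
-- def resolve_conflicts(agent_rankings, active_agents):
--     final_goals = [rank[0] if rank else None for rank in agent_rankings]
--     positions = [0 for _ in agent_rankings]
--
--     while True:
--         goal_to_agents = {}
--         for idx, goal in enumerate(final_goals):
--             if active_agents[idx] and goal:
--                 goal_to_agents.setdefault(goal, []).append(idx)
--
--         conflicts_exist = any(len(lst) > 1 for lst in goal_to_agents.values())
--         if not conflicts_exist:
--             break
--
--         for goal, agents in goal_to_agents.items():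
--             if len(agents) <= 1:
--                 continue
--             agents.sort()  # Ensure lower index agent wins
--             for loser_idx in agents[1:]:
--                 positions[loser_idx] += 1
--                 if positions[loser_idx] < len(agent_rankings[loser_idx]):
--                     final_goals[loser_idx] = agent_rankings[loser_idx][positions[loser_idx]]
--                 else:
--                     final_goals[loser_idx] = None
--     return final_goals
-- ===== SOURCE B (Python) =====
-- def resolve_conflicts(agent_rankings, active_agents):
--     # Serial dictatorship: agents in index order; each active agent takes the
--     # first preference that is falsy or not already claimed by a lower-index agent.
--     claimed = set()
--     final_goals = []
--     for i, rank in enumerate(agent_rankings):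
--         if not active_agents[i]:
--             final_goals.append(rank[0] if rank else None)
--             continue
--         choice = None
--         for g in rank:
--             if not g or g not in claimed:
--                 choice = g
--                 break
--         final_goals.append(choice)
--         if choice:
--             claimed.add(choice)
--     return final_goals
-- ===== Notes on version B (the rewrite author's own statement) =====
-- stated objective: alternative
-- what changed: A repeatedly rebuilds a goal->agents dict and advances conflict losers one preference per round until no conflicts remain; B computes the same assignment in one serial-dictatorship pass, giving each agent in index order its first preference that is falsy or not yet claimed by a lower-index active agent.
import Mathlib
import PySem

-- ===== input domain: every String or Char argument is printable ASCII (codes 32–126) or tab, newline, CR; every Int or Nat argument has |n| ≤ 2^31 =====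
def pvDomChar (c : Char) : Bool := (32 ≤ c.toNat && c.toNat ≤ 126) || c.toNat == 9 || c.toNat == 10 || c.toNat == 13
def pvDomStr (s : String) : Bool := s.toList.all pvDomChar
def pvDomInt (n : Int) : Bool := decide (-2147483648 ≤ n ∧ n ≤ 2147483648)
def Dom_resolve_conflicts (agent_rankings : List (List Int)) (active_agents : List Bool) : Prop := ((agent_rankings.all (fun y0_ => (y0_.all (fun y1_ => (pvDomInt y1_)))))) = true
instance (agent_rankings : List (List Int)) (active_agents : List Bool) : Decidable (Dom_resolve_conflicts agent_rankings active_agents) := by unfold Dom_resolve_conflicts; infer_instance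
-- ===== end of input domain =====

-- B replaces A's iterated conflict-resolution rounds (rebuild goal->agents dict, advance losers,
-- repeat) by a single serial-dictatorship pass: each agent in index order takes its first
-- preference that is falsy or not yet claimed by a lower-index active agent; objective: alternative.


-- ===== PORT A =====
-- goal_to_agents = {}; for idx, goal in enumerate(final_goals): if active_agents[idx] and goal: setdefault(goal, []).append(idx)
-- (active_agents[idx] is ported as pyGetD …: exact inside Pre_, where the index is always in range)
def pvBuild (final_goals : List (Option Int)) (active_agents : List Bool) : PySem.Dict Int (List Int) :=
  (PySem.List.enumerate final_goals 0).foldl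
    (fun d p =>
      match p.2 with
      | some g => if PySem.List.pyGetD active_agents p.1 false && g != 0 then d.modify g [] (fun l => l ++ [p.1]) else d
      | none => d)
    PySem.Dict.empty

-- positions[l] += 1; final_goals[l] = rankings[l][positions[l]] if positions[l] < len(rankings[l]) else None
-- (l comes from enumerate, so l ≥ 0 and .toNat is exact)
def pvAdvance (agent_rankings : List (List Int)) (st : List (Option Int) × List Nat) (l : Int) :
    List (Option Int) × List Nat :=
  let i := l.toNat
  let p := st.2.getD i 0 + 1
  let rank := agent_rankings.getD i []
  (st.1.set i (if p < rank.length then some (rank.getD p 0) else none), st.2.set i p)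

-- for goal, agents in goal_to_agents.items(): if len(agents) <= 1: continue; agents.sort(); for loser in agents[1:]: …
def pvRound (agent_rankings : List (List Int)) (d : PySem.Dict Int (List Int))
    (st : List (Option Int) × List Nat) : List (Option Int) × List Nat :=
  d.items.foldl
    (fun st pr =>
      if pr.2.length ≤ 1 then st
      else ((PySem.List.sorted pr.2 (fun x => x) false).drop 1).foldl (pvAdvance agent_rankings) st)
    st

-- the 'while True' loop; fuel (sum of ranking lengths + 1) is proven sufficient below, so the
-- fuel-0 fallback is never reached on any input
def pvLoopA (agent_rankings : List (List Int)) (active_agents : List Bool) :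
    Nat → List (Option Int) × List Nat → List (Option Int)
  | 0, st => st.1
  | fuel + 1, st =>
      let d := pvBuild st.1 active_agents
      if d.values.any (fun lst => decide (1 < lst.length)) then
        pvLoopA agent_rankings active_agents fuel (pvRound agent_rankings d st)
      else st.1

def resolve_conflicts (agent_rankings : List (List Int)) (active_agents : List Bool) : List (Option Int) :=
  pvLoopA agent_rankings active_agents ((agent_rankings.map List.length).sum + 1)
    (agent_rankings.map (fun rank => rank.head?), agent_rankings.map (fun _ => 0))

-- ===== PORT B =====
-- choice = None; for g in rank: if not g or g not in claimed: choice = g; break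
def pvScan (claimed : PySem.Set Int) : List Int → Option Int
  | [] => none
  | g :: rest => if g == 0 || !(PySem.Set.contains claimed g) then some g else pvScan claimed rest

-- one agent of B's single pass (active_agents[i] ported as pyGetD …: exact inside Pre_)
def pvStep (active_agents : List Bool) (st : PySem.Set Int × List (Option Int)) (p : Int × List Int) :
    PySem.Set Int × List (Option Int) :=
  if !(PySem.List.pyGetD active_agents p.1 false) then (st.1, st.2 ++ [p.2.head?])
  else
    let c := pvScan st.1 p.2
    ((match c with
      | some g => if g != 0 then PySem.Set.add st.1 g else st.1
      | none => st.1), st.2 ++ [c])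

def resolve_conflicts_alt (agent_rankings : List (List Int)) (active_agents : List Bool) : List (Option Int) :=
  ((PySem.List.enumerate agent_rankings 0).foldl (pvStep active_agents) (PySem.Set.empty, [])).2

-- ===== PRECONDITION & SPEC =====
-- Python A (and B alike) evaluates active_agents[idx] for every idx below len(agent_rankings) and
-- raises IndexError when active_agents is shorter; exactly those inputs are excluded.
def Pre_resolve_conflicts (agent_rankings : List (List Int)) (active_agents : List Bool) : Prop :=
  agent_rankings.length ≤ active_agents.length
instance (agent_rankings : List (List Int)) (active_agents : List Bool) : Decidable (Pre_resolve_conflicts agent_rankings active_agents) := by unfold Pre_resolve_conflicts; infer_instance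

def pvWitness_resolve_conflicts : List (List Int) × List Bool := ([[1, 2], [1, 2], [2]], [true, true, true])

def Spec_resolve_conflicts (agent_rankings : List (List Int)) (active_agents : List Bool) (out : List (Option Int)) : Prop := out = resolve_conflicts_alt agent_rankings active_agents
instance (agent_rankings : List (List Int)) (active_agents : List Bool) (out : List (Option Int)) : Decidable (Spec_resolve_conflicts agent_rankings active_agents out) := by unfold Spec_resolve_conflicts; infer_instance

-- ===== CLAIM (what is proved, stated in full; the proofs are below) =====
def Claim_equal_resolve_conflicts : Prop := ∀ (agent_rankings : List (List Int)) (active_agents : List Bool), Dom_resolve_conflicts agent_rankings active_agents → Pre_resolve_conflicts agent_rankings active_agents → Spec_resolve_conflicts agent_rankings active_agents (resolve_conflicts agent_rankings active_agents)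

-- ===== LEMMAS AND PROOFS =====

-- serial-dictatorship state after the first i agents: the set claimed by active agents 0..i-1
def sdClaimed (R : List (List Int)) (act : List Bool) : Nat → PySem.Set Int
  | 0 => PySem.Set.empty
  | i + 1 =>
      let c := sdClaimed R act i
      if act.getD i false then
        match pvScan c (R.getD i []) with
        | some g => if g != 0 then PySem.Set.add c g else c
        | none => c
      else c

-- B's output for agent i
def sdOut (R : List (List Int)) (act : List Bool) (i : Nat) : Option Int :=
  if act.getD i false then pvScan (sdClaimed R act i) (R.getD i []) else (R.getD i []).head?

theorem alt_go (R0 : List (List Int)) (act : List Bool) :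
    ∀ (l : List (List Int)) (k : Nat) (acc : List (Option Int)),
      R0.drop k = l →
      ((PySem.List.enumerate l (k : Int)).foldl (pvStep act) (sdClaimed R0 act k, acc)).2
        = acc ++ (List.range' k l.length).map (sdOut R0 act) := by
  intro l
  induction l with
  | nil => intro k acc _; simp [PySem.List.enumerate_nil]
  | cons r rest ih =>
    intro k acc hdrop
    have hget : R0[k]? = some r := by
      rw [← List.head?_drop, hdrop]; rfl
    have hgetD : R0.getD k [] = r := by
      simp [List.getD, hget]
    have hdrop' : R0.drop (k + 1) = rest := by
      have : (R0.drop k).drop 1 = rest := by rw [hdrop]; rfl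
      rw [List.drop_drop] at this
      exact this
    rw [PySem.List.enumerate_cons]
    rw [List.foldl_cons]
    have hcast : (k : Int) + 1 = ((k + 1 : Nat) : Int) := by push_cast; ring
    rw [hcast]
    have hpy : PySem.List.pyGetD act (k : Int) false = act.getD k false :=
      PySem.List.pyGetD_natCast act k false
    by_cases hact : act.getD k false = true
    · have hstep : pvStep act (sdClaimed R0 act k, acc) ((k : Int), r)
          = (sdClaimed R0 act (k + 1), acc ++ [sdOut R0 act k]) := by
        simp only [pvStep, hpy, hact, Bool.not_true, Bool.false_eq_true, if_false]
        simp only [sdClaimed, sdOut, hact, if_true, hgetD]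
      rw [hstep, ih (k + 1) _ hdrop']
      simp [List.range'_succ]
    · have hact' : act.getD k false = false := by simpa using hact
      have hstep : pvStep act (sdClaimed R0 act k, acc) ((k : Int), r)
          = (sdClaimed R0 act (k + 1), acc ++ [sdOut R0 act k]) := by
        simp only [pvStep, hpy, hact', Bool.not_false, if_true]
        simp only [sdClaimed, sdOut, hact', Bool.false_eq_true, if_false, hgetD]
      rw [hstep, ih (k + 1) _ hdrop']
      simp [List.range'_succ]

theorem alt_eq_map_sdOut (R : List (List Int)) (act : List Bool) :
    resolve_conflicts_alt R act = (List.range R.length).map (sdOut R act) := by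
  have h := alt_go R act R 0 [] (by simp)
  simp only [Nat.cast_zero] at h
  rw [resolve_conflicts_alt, List.range_eq_range']
  simpa [sdClaimed] using h

-- the goal agent i currently points at, given its position
def pvGoalAt (R : List (List Int)) (pos : List Nat) (i : Nat) : Option Int :=
  if pos.getD i 0 < (R.getD i []).length then some ((R.getD i []).getD (pos.getD i 0) 0) else none

-- loop invariant of A's while-loop
def pvInv (R : List (List Int)) (act : List Bool) (st : List (Option Int) × List Nat) : Prop :=
  st.1.length = R.length ∧ st.2.length = R.length ∧
  (∀ i, st.2.getD i 0 ≤ (R.getD i []).length) ∧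
  (∀ i, i < R.length → st.1.getD i none = pvGoalAt R st.2 i) ∧
  (∀ i, act.getD i false = false → st.2.getD i 0 = 0) ∧
  (∀ i, act.getD i false = true → ∀ k, k < st.2.getD i 0 →
      (R.getD i []).getD k 0 ≠ 0 ∧ (R.getD i []).getD k 0 ∈ sdClaimed R act i)

-- remaining work: Σ (len rankings[i] − positions[i])
def pvMeasure (R : List (List Int)) (pos : List Nat) : Nat :=
  ((List.range R.length).map (fun i => (R.getD i []).length - pos.getD i 0)).sum


theorem pvScan_cons (c : PySem.Set Int) (g : Int) (rest : List Int) :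
    pvScan c (g :: rest) = if g = 0 ∨ ¬ g ∈ c then some g else pvScan c rest := by
  simp only [pvScan]
  by_cases h0 : g = 0
  · simp [h0]
  · by_cases hm : g ∈ c
    · simp [h0, hm]
    · simp [h0, hm]

theorem pvScan_drop (c : PySem.Set Int) :
    ∀ (p : Nat) (rank : List Int), (∀ k, k < p → rank.getD k 0 ≠ 0 ∧ rank.getD k 0 ∈ c) →
      p ≤ rank.length → pvScan c rank = pvScan c (rank.drop p) := by
  intro p
  induction p with
  | zero => intro rank _ _; rfl
  | succ q ih =>
    intro rank h hlen
    match rank with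
    | [] => simp at hlen
    | g :: rest =>
      have h0 := h 0 (Nat.succ_pos q)
      simp only [List.getD_cons_zero] at h0
      rw [pvScan_cons]
      rw [if_neg (fun hcon => hcon.elim h0.1 (fun hn => hn h0.2))]
      rw [ih rest (fun k hk => by have := h (k+1) (by omega); simpa using this) (by simpa using hlen)]
      rfl

theorem mem_sdClaimed_succ (R : List (List Int)) (act : List Bool) (i : Nat) (g : Int) :
    g ∈ sdClaimed R act (i + 1) ↔
      g ∈ sdClaimed R act i ∨ (act.getD i false = true ∧ sdOut R act i = some g ∧ g ≠ 0) := by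
  by_cases hact : act.getD i false = true
  · have hout : sdOut R act i = pvScan (sdClaimed R act i) (R.getD i []) := by
      rw [sdOut, if_pos hact]
    rw [hout]
    simp only [sdClaimed, hact, if_true]
    cases hscan : pvScan (sdClaimed R act i) (R.getD i []) with
    | none => simp [hact]
    | some g' =>
      by_cases h0 : g' = 0
      · subst h0
        simp only [bne_self_eq_false, Bool.false_eq_true, if_false]
        constructor
        · exact Or.inl
        · rintro (h | ⟨_, heq, hne⟩)
          · exact h
          · injection heq with h2; exact absurd h2.symm hne
      · have hb : (g' != 0) = true := by simpa using h0
        simp only [hb, if_true, PySem.Set.mem_add]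
        constructor
        · rintro (h | rfl)
          · exact Or.inl h
          · exact Or.inr ⟨trivial, rfl, h0⟩
        · rintro (h | ⟨_, heq, hne⟩)
          · exact Or.inl h
          · injection heq with h2; exact Or.inr h2.symm
  · have hact' : act.getD i false = false := by simpa using hact
    simp only [sdClaimed, hact', Bool.false_eq_true, if_false]
    constructor
    · exact Or.inl
    · rintro (h | ⟨h, _⟩)
      · exact h
      · exact h.elim

theorem sdClaimed_mono (R : List (List Int)) (act : List Bool) {g : Int} :
    ∀ (i j : Nat), i ≤ j → g ∈ sdClaimed R act i → g ∈ sdClaimed R act j := by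
  intro i j
  induction j with
  | zero => intro h hm; have : i = 0 := Nat.le_zero.mp h; subst this; exact hm
  | succ m ihm =>
    intro h hm
    by_cases he : i = m + 1
    · subst he; exact hm
    · exact (mem_sdClaimed_succ R act m g).mpr (Or.inl (ihm (by omega) hm))

-- the (goal, index) pairs that A's dict-building loop inserts, in insertion order
def pvSel (act : List Bool) : Int × Option Int → Option (Int × Int)
  | (i, some g) => if PySem.List.pyGetD act i false && g != 0 then some (g, i) else none
  | (_, none) => none

def pvPairs (fg : List (Option Int)) (act : List Bool) : List (Int × Int) :=
  (PySem.List.enumerate fg 0).filterMap (pvSel act)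

theorem build_eq_fold_pairs (fg : List (Option Int)) (act : List Bool) :
    pvBuild fg act = (pvPairs fg act).foldl (fun d q => d.modify q.1 [] (fun l => l ++ [q.2])) PySem.Dict.empty := by
  rw [pvPairs, List.foldl_filterMap, pvBuild]
  apply PySem.List.foldl_congr_mem
  intro d p _
  rcases p with ⟨i, g?⟩
  cases g? with
  | none => rfl
  | some g =>
    rw [show pvSel act (i, some g) = if PySem.List.pyGetD act i false && g != 0 then some (g, i) else none from rfl]
    by_cases h : (PySem.List.pyGetD act i false && g != 0) = true
    · rw [if_pos h]
      show (if (PySem.List.pyGetD act i false && g != 0) = true then d.modify g [] fun l => l ++ [i] else d)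
          = d.modify g [] fun l => l ++ [i]
      rw [if_pos h]
    · rw [if_neg h]
      show (if (PySem.List.pyGetD act i false && g != 0) = true then d.modify g [] fun l => l ++ [i] else d) = d
      rw [if_neg h]

theorem pvBuild_getD (fg : List (Option Int)) (act : List Bool) (g : Int) :
    (pvBuild fg act).getD g [] = ((pvPairs fg act).filter (fun q => q.1 == g)).map (·.2) := by
  rw [build_eq_fold_pairs, PySem.Dict.getD_foldl_modify_append]
  simp

theorem pvBuild_keys (fg : List (Option Int)) (act : List Bool) :
    (pvBuild fg act).keys = PySem.Set.ofList ((pvPairs fg act).map (·.1)) := by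
  rw [build_eq_fold_pairs]
  rw [PySem.Dict.keys_foldl_modify_key (key := fun q : Int × Int => q.1)]
  rw [PySem.Dict.keys_empty, PySem.Set.update_nil_left]

theorem pvBuild_nodup_keys (fg : List (Option Int)) (act : List Bool) :
    (pvBuild fg act).keys.Nodup := by
  rw [pvBuild_keys]; exact PySem.Set.nodup_ofList _

theorem pvBuild_items (fg : List (Option Int)) (act : List Bool) :
    (pvBuild fg act).items = (pvBuild fg act).keys.map (fun g => (g, (pvBuild fg act).getD g [])) :=
  PySem.Dict.items_eq_map_keys _ (pvBuild_nodup_keys fg act) []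

theorem mem_pvPairs (fg : List (Option Int)) (act : List Bool) (q : Int × Int) :
    q ∈ pvPairs fg act ↔ ∃ k : Nat, k < fg.length ∧ q.2 = (k : Int) ∧
      fg.getD k none = some q.1 ∧ act.getD k false = true ∧ q.1 ≠ 0 := by
  rw [pvPairs, List.mem_filterMap]
  constructor
  · rintro ⟨p, hp, hsel⟩
    rw [PySem.List.mem_enumerate_iff] at hp
    obtain ⟨k, hk, rfl⟩ := hp
    have hz : (0:Int) + (k:Int) = (k:Int) := by ring
    revert hsel
    show pvSel act ((0:Int) + (k:Int), fg[k]) = some q → _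
    rw [hz]
    cases hfg : fg[k] with
    | none => intro hsel; exact absurd hsel (by simp [pvSel])
    | some g =>
      show pvSel act ((k:Int), some g) = some q → _
      rw [show pvSel act ((k:Int), some g)
            = if PySem.List.pyGetD act (k:Int) false && g != 0 then some (g, (k:Int)) else none from rfl]
      by_cases hc : (PySem.List.pyGetD act (k:Int) false && g != 0) = true
      · rw [if_pos hc]
        intro hsel
        injection hsel with h2
        subst h2
        rw [Bool.and_eq_true, PySem.List.pyGetD_natCast] at hc
        refine ⟨k, hk, rfl, ?_, hc.1, by simpa using hc.2⟩
        rw [List.getD_eq_getElem fg none hk, hfg]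
      · rw [if_neg hc]; intro hsel; exact absurd hsel (by simp)
  · rintro ⟨k, hk, hq2, hfg, hact, h0⟩
    refine ⟨((0:Int) + (k:Int), fg[k]), ?_, ?_⟩
    · rw [PySem.List.mem_enumerate_iff]; exact ⟨k, hk, rfl⟩
    · have hfg' : fg[k] = some q.1 := by
        rw [← List.getD_eq_getElem fg none hk]; exact hfg
      have hz : (0:Int) + (k:Int) = (k:Int) := by ring
      show pvSel act ((0:Int) + (k:Int), fg[k]) = some q
      rw [hz, hfg']
      rw [show pvSel act ((k:Int), some q.1)
            = if PySem.List.pyGetD act (k:Int) false && q.1 != 0 then some (q.1, (k:Int)) else none from rfl]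
      rw [if_pos (by rw [PySem.List.pyGetD_natCast, hact]; simpa using h0)]
      rw [← hq2]

theorem pvPairs_pairwise (fg : List (Option Int)) (act : List Bool) :
    (pvPairs fg act).Pairwise (fun a b => a.2 < b.2) := by
  rw [pvPairs]
  refine List.Pairwise.filterMap (pvSel act) ?_ (PySem.List.pairwise_lt_enumerate fg (0:Int))
  rintro ⟨i, g?⟩ ⟨i', g?'⟩ hlt b hb b' hb'
  have hbi : b.2 = i := by
    cases g? with
    | none => exact absurd hb (by simp [pvSel])
    | some g =>
      revert hb
      rw [show pvSel act (i, some g) = if PySem.List.pyGetD act i false && g != 0 then some (g, i) else none from rfl]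
      by_cases hc : (PySem.List.pyGetD act i false && g != 0) = true
      · rw [if_pos hc]; intro hb; injection hb with h2; rw [← h2]
      · rw [if_neg hc]; intro hb; exact absurd hb (by simp)
  have hbi' : b'.2 = i' := by
    cases g?' with
    | none => exact absurd hb' (by simp [pvSel])
    | some g =>
      revert hb'
      rw [show pvSel act (i', some g) = if PySem.List.pyGetD act i' false && g != 0 then some (g, i') else none from rfl]
      by_cases hc : (PySem.List.pyGetD act i' false && g != 0) = true
      · rw [if_pos hc]; intro hb'; injection hb' with h2; rw [← h2]
      · rw [if_neg hc]; intro hb'; exact absurd hb' (by simp)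
  rw [hbi, hbi']; exact hlt

-- the agents recorded under key g: exactly the active agents currently on truthy goal g, in increasing order
def pvVal (fg : List (Option Int)) (act : List Bool) (g : Int) : List Int :=
  ((pvPairs fg act).filter (fun q => q.1 == g)).map (·.2)

theorem mem_pvVal (fg : List (Option Int)) (act : List Bool) (g a : Int) :
    a ∈ pvVal fg act g ↔ (g, a) ∈ pvPairs fg act := by
  rw [pvVal, List.mem_map]
  constructor
  · rintro ⟨q, hq, rfl⟩
    rw [List.mem_filter] at hq
    have : q.1 = g := by simpa using hq.2
    have hq1 := hq.1
    rwa [show q = (g, q.2) by rw [← this]] at hq1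
  · intro h
    exact ⟨(g, a), List.mem_filter.mpr ⟨h, by simp⟩, rfl⟩

theorem pvVal_pairwise (fg : List (Option Int)) (act : List Bool) (g : Int) :
    (pvVal fg act g).Pairwise (· < ·) := by
  rw [pvVal]
  exact List.Pairwise.map _ (fun a b h => h) ((pvPairs_pairwise fg act).filter _)

theorem pvVal_sorted (fg : List (Option Int)) (act : List Bool) (g : Int) :
    PySem.List.sorted (pvVal fg act g) (fun x => x) false = pvVal fg act g :=
  PySem.List.sorted_eq_self_of_pairwise _ _ ((pvVal_pairwise fg act g).imp (fun h => le_of_lt h))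

theorem mem_pvVal_facts (fg : List (Option Int)) (act : List Bool) (g a : Int)
    (h : a ∈ pvVal fg act g) :
    ∃ k : Nat, k < fg.length ∧ a = (k : Int) ∧ fg.getD k none = some g ∧
      act.getD k false = true ∧ g ≠ 0 := by
  rw [mem_pvVal, mem_pvPairs] at h
  simpa using h

theorem pvVal_key_unique (fg : List (Option Int)) (act : List Bool) (g g' a : Int)
    (h : a ∈ pvVal fg act g) (h' : a ∈ pvVal fg act g') : g = g' := by
  obtain ⟨k, _, rfl, hfg, _, _⟩ := mem_pvVal_facts fg act g a h
  obtain ⟨k', _, hkk, hfg', _, _⟩ := mem_pvVal_facts fg act g' _ h'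
  have : k = k' := by exact_mod_cast hkk
  subst this
  rw [hfg] at hfg'
  injection hfg'

-- a strict pointwise decrease at one index of a range-sum
theorem sum_range_map_lt (i : Nat) (f f' : Nat → Nat) :
    ∀ n : Nat, i < n → (∀ j, j < n → j ≠ i → f' j = f j) → f' i < f i →
      ((List.range n).map f').sum < ((List.range n).map f).sum := by
  intro n
  induction n with
  | zero => omega
  | succ m ih =>
    intro hin hagree hlt
    rw [List.range_succ, List.map_append, List.map_append, List.sum_append, List.sum_append]
    by_cases hi : i = m
    · subst hi
      have : (List.range i).map f' = (List.range i).map f := by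
        apply List.map_congr_left
        intro j hj
        exact hagree j (by have := List.mem_range.mp hj; omega) (by have := List.mem_range.mp hj; omega)
      rw [this]
      simp only [List.map_cons, List.map_nil, List.sum_cons, List.sum_nil]
      omega
    · have h1 : i < m := by omega
      have h2 := ih h1 (fun j hj hne => hagree j (by omega) hne) hlt
      have h3 : f' m = f m := hagree m (by omega) (by omega)
      simp only [List.map_cons, List.map_nil, List.sum_cons, List.sum_nil]
      omega

theorem measure_set_lt (R : List (List Int)) (pos : List Nat) (i : Nat)
    (hlen : pos.length = R.length) (h1 : i < R.length)
    (h2 : pos.getD i 0 < (R.getD i []).length) :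
    pvMeasure R (pos.set i (pos.getD i 0 + 1)) < pvMeasure R pos := by
  rw [pvMeasure, pvMeasure]
  apply sum_range_map_lt i _ _ R.length h1
  · intro j _ hne
    have : (pos.set i (pos.getD i 0 + 1)).getD j 0 = pos.getD j 0 := by
      simp [List.getD, List.getElem?_set_ne (Ne.symm hne)]
    rw [this]
  · have hset : (pos.set i (pos.getD i 0 + 1)).getD i 0 = pos.getD i 0 + 1 := by
      have hi : i < pos.length := by omega
      simp [List.getD, hi]
    rw [hset]
    omega

theorem getD_set_self' {α : Type} (l : List α) (i : Nat) (v d : α) (h : i < l.length) :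
    (l.set i v).getD i d = v := by
  simp [List.getD, h]

theorem getD_set_ne' {α : Type} (l : List α) (i j : Nat) (v : α) (d : α) (h : j ≠ i) :
    (l.set i v).getD j d = l.getD j d := by
  simp [List.getD, List.getElem?_set_ne (Ne.symm h)]

theorem getD_some_lt {α : Type} (l : List (Option α)) (i : Nat) (g : α)
    (h : l.getD i none = some g) : i < l.length := by
  by_contra hcon
  rw [List.getD_eq_default] at h
  · simp at h
  · omega

theorem head?_eq_getD {α : Type} (l : List α) (d : α) :
    l.head? = if 0 < l.length then some (l.getD 0 d) else none := by
  cases l <;> simp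

theorem one_lt_length_of_two_mem {α : Type} (l : List α) (a b : α)
    (ha : a ∈ l) (hb : b ∈ l) (hne : a ≠ b) : 1 < l.length := by
  match l with
  | [] => simp at ha
  | [x] =>
    rw [List.mem_singleton] at ha hb
    exact absurd (ha.trans hb.symm) hne
  | _ :: _ :: _ => simp

theorem nodup_flatMap_aux {α β : Type} :
    ∀ (l : List α) (f : α → List β), (∀ x ∈ l, (f x).Nodup) →
      l.Pairwise (fun x y => ∀ b ∈ f x, b ∉ f y) → (l.flatMap f).Nodup := by
  intro l f
  induction l with
  | nil => intro _ _; simp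
  | cons x t ih =>
    intro hn hp
    rw [List.flatMap_cons, List.nodup_append]
    rw [List.pairwise_cons] at hp
    refine ⟨hn x (by simp), ih (fun y hy => hn y (by simp [hy])) hp.2, ?_⟩
    intro b hbx b' hb' heq
    subst heq
    rw [List.mem_flatMap] at hb'
    obtain ⟨y, hy, hby⟩ := hb'
    exact hp.1 y hy b hbx hby

theorem mem_sdClaimed_iff (R : List (List Int)) (act : List Bool) (g : Int) :
    ∀ i : Nat, g ∈ sdClaimed R act i ↔
      ∃ j : Nat, j < i ∧ act.getD j false = true ∧ sdOut R act j = some g ∧ g ≠ 0 := by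
  intro i
  induction i with
  | zero =>
    constructor
    · intro h; exact absurd h (by simp [sdClaimed, PySem.Set.empty])
    · rintro ⟨j, hj, _⟩; omega
  | succ m ih =>
    rw [mem_sdClaimed_succ, ih]
    constructor
    · rintro (⟨j, hj, h⟩ | h)
      · exact ⟨j, by omega, h⟩
      · exact ⟨m, by omega, h⟩
    · rintro ⟨j, hj, h⟩
      by_cases hjm : j = m
      · subst hjm; exact Or.inr h
      · exact Or.inl ⟨j, by omega, h⟩

theorem holder_claimed (R : List (List Int)) (act : List Bool)
    (st : List (Option Int) × List Nat) (hInv : pvInv R act st) (j : Nat) (g : Int)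
    (hact : act.getD j false = true) (hg : st.1.getD j none = some g) (hg0 : g ≠ 0) :
    g ∈ sdClaimed R act (j + 1) := by
  obtain ⟨hl1, hl2, hple, hfg, hinact, hskip⟩ := hInv
  have hj : j < R.length := hl1 ▸ getD_some_lt _ _ _ hg
  have hgoal := hfg j hj
  rw [hg] at hgoal
  rw [pvGoalAt] at hgoal
  by_cases hlt : st.2.getD j 0 < (R.getD j []).length
  case neg => rw [if_neg hlt] at hgoal; simp at hgoal
  rw [if_pos hlt] at hgoal
  have hgval : (R.getD j []).getD (st.2.getD j 0) 0 = g := by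
    injection hgoal with h2; exact h2.symm
  by_cases hmem : g ∈ sdClaimed R act j
  · exact sdClaimed_mono R act j (j + 1) (by omega) hmem
  · have hscan : pvScan (sdClaimed R act j) (R.getD j []) = some g := by
      rw [pvScan_drop (sdClaimed R act j) (st.2.getD j 0) (R.getD j []) (hskip j hact) (by omega)]
      rw [List.drop_eq_getElem_cons hlt, pvScan_cons]
      rw [← List.getD_eq_getElem (R.getD j []) 0 hlt]
      rw [hgval]
      rw [if_pos (Or.inr hmem)]
    have hout : sdOut R act j = some g := by rw [sdOut, if_pos hact]; exact hscan
    exact (mem_sdClaimed_succ R act j g).mpr (Or.inr ⟨hact, hout, hg0⟩)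

theorem pvAdvance_natCast (R : List (List Int)) (st : List (Option Int) × List Nat) (i : Nat) :
    pvAdvance R st ((i : Nat) : Int) =
      (st.1.set i (if st.2.getD i 0 + 1 < (R.getD i []).length
          then some ((R.getD i []).getD (st.2.getD i 0 + 1) 0) else none),
       st.2.set i (st.2.getD i 0 + 1)) := by
  rw [pvAdvance]
  simp

theorem advance_inv (R : List (List Int)) (act : List Bool)
    (st : List (Option Int) × List Nat) (hInv : pvInv R act st) (i j : Nat) (g : Int)
    (hji : j < i) (hacti : act.getD i false = true) (hactj : act.getD j false = true)
    (hgi : st.1.getD i none = some g) (hg0 : g ≠ 0) (hgj : st.1.getD j none = some g) :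
    pvInv R act (pvAdvance R st ((i : Nat) : Int)) ∧
      pvMeasure R (pvAdvance R st ((i : Nat) : Int)).2 < pvMeasure R st.2 := by
  obtain ⟨hl1, hl2, hple, hfg, hinact, hskip⟩ := hInv
  have hi : i < R.length := hl1 ▸ getD_some_lt _ _ _ hgi
  have hgoal := hfg i hi
  rw [hgi, pvGoalAt] at hgoal
  by_cases hlt : st.2.getD i 0 < (R.getD i []).length
  case neg => rw [if_neg hlt] at hgoal; exact absurd hgoal (by simp)
  rw [if_pos hlt] at hgoal
  have hgval : (R.getD i []).getD (st.2.getD i 0) 0 = g := by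
    injection hgoal with h2; exact h2.symm
  rw [pvAdvance_natCast]
  have hclaim : g ∈ sdClaimed R act i :=
    sdClaimed_mono R act (j + 1) i (by omega) (holder_claimed R act st ⟨hl1, hl2, hple, hfg, hinact, hskip⟩ j g hactj hgj hg0)
  constructor
  · refine ⟨by simp [hl1], by simp [hl2], ?_, ?_, ?_, ?_⟩
    · intro i'
      by_cases he : i = i'
      · subst he
        rw [getD_set_self' _ _ _ _ (by omega)]
        omega
      · rw [getD_set_ne' _ _ _ _ _ (Ne.symm he)]; exact hple i'
    · intro i' hi'
      by_cases he : i = i'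
      · subst he
        rw [getD_set_self' _ _ _ _ (by omega), pvGoalAt, getD_set_self' _ _ _ _ (by omega)]
      · rw [getD_set_ne' _ _ _ _ _ (Ne.symm he), pvGoalAt, getD_set_ne' _ _ _ _ _ (Ne.symm he)]
        exact (hfg i' hi').trans (by rw [pvGoalAt])
    · intro i' hact'
      have he : i' ≠ i := fun h => by rw [h, hacti] at hact'; exact Bool.noConfusion hact'
      rw [getD_set_ne' _ _ _ _ _ he]
      exact hinact i' hact'
    · intro i' hact' k hk
      by_cases he : i = i'
      · subst he
        rw [getD_set_self' _ _ _ _ (by omega)] at hk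
        by_cases hkp : k < st.2.getD i 0
        · exact hskip i hact' k hkp
        · have : k = st.2.getD i 0 := by omega
          subst this
          exact ⟨by rw [hgval]; exact hg0, by rw [hgval]; exact hclaim⟩
      · rw [getD_set_ne' _ _ _ _ _ (Ne.symm he)] at hk
        exact hskip i' hact' k hk
  · exact measure_set_lt R st.2 i (by omega) hi hlt

theorem run_losers (R : List (List Int)) (act : List Bool) :
    ∀ (L : List Int) (st : List (Option Int) × List Nat), pvInv R act st → L.Nodup →
      (∀ l ∈ L, ∃ (i j : Nat) (g : Int), l = (i : Int) ∧ j < i ∧ ¬((j : Int) ∈ L) ∧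
          act.getD i false = true ∧ act.getD j false = true ∧
          st.1.getD i none = some g ∧ g ≠ 0 ∧ st.1.getD j none = some g) →
      pvInv R act (L.foldl (pvAdvance R) st) ∧
        pvMeasure R (L.foldl (pvAdvance R) st).2 ≤ pvMeasure R st.2 ∧
        (L ≠ [] → pvMeasure R (L.foldl (pvAdvance R) st).2 < pvMeasure R st.2) := by
  intro L
  induction L with
  | nil => intro st hInv _ _; exact ⟨hInv, le_refl _, fun h => absurd rfl h⟩
  | cons l T ih =>
    intro st hInv hnd hw
    obtain ⟨hlT, hndT⟩ := List.nodup_cons.mp hnd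
    obtain ⟨i, j, g, rfl, hji, hjnot, hacti, hactj, hgi, hg0, hgj⟩ :=
      hw _ (List.mem_cons_self)
    have hadv := advance_inv R act st hInv i j g hji hacti hactj hgi hg0 hgj
    rw [List.foldl_cons]
    have hne_fst : ∀ (i' : Nat), i' ≠ i →
        (pvAdvance R st ((i : Nat) : Int)).1.getD i' none = st.1.getD i' none := by
      intro i' hne
      rw [pvAdvance_natCast]
      exact getD_set_ne' _ _ _ _ _ hne
    have hw' : ∀ l' ∈ T, ∃ (i' j' : Nat) (g' : Int), l' = (i' : Int) ∧ j' < i' ∧ ¬((j' : Int) ∈ T) ∧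
        act.getD i' false = true ∧ act.getD j' false = true ∧
        (pvAdvance R st ((i : Nat) : Int)).1.getD i' none = some g' ∧ g' ≠ 0 ∧
        (pvAdvance R st ((i : Nat) : Int)).1.getD j' none = some g' := by
      intro l' hl'
      obtain ⟨i', j', g', rfl, hji', hjnot', hacti', hactj', hgi', hg0', hgj'⟩ :=
        hw _ (List.mem_cons_of_mem _ hl')
      have hi'ne : i' ≠ i := by
        intro h
        subst h
        exact hlT hl'
      have hj'ne : j' ≠ i := by
        intro h
        subst h
        exact hjnot' (List.mem_cons_self)
      exact ⟨i', j', g', rfl, hji', fun hmem => hjnot' (List.mem_cons_of_mem _ hmem),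
        hacti', hactj', by rw [hne_fst i' hi'ne]; exact hgi', hg0',
        by rw [hne_fst j' hj'ne]; exact hgj'⟩
    have hT := ih (pvAdvance R st ((i : Nat) : Int)) hadv.1 hndT hw'
    refine ⟨hT.1, le_of_lt (lt_of_le_of_lt hT.2.1 hadv.2), fun _ => lt_of_le_of_lt hT.2.1 hadv.2⟩

theorem foldl_groups_eq_flat (R : List (List Int)) :
    ∀ (l : List (Int × List Int)) (st : List (Option Int) × List Nat),
      l.foldl (fun st pr => if pr.2.length ≤ 1 then st
        else ((PySem.List.sorted pr.2 (fun x => x) false).drop 1).foldl (pvAdvance R) st) st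
      = (l.flatMap (fun pr => if pr.2.length ≤ 1 then ([] : List Int)
          else (PySem.List.sorted pr.2 (fun x => x) false).drop 1)).foldl (pvAdvance R) st := by
  intro l
  induction l with
  | nil => intro st; rfl
  | cons pr t ih =>
    intro st
    rw [List.foldl_cons, List.flatMap_cons, List.foldl_append]
    by_cases h : pr.2.length ≤ 1
    · rw [if_pos h, if_pos h, List.foldl_nil]
      exact ih st
    · rw [if_neg h, if_neg h]
      exact ih _

-- the flat list of all losers that one round advances, in processing order
def pvLosers (fg : List (Option Int)) (act : List Bool) : List Int :=
  (pvBuild fg act).items.flatMap (fun pr => if pr.2.length ≤ 1 then ([] : List Int)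
    else (PySem.List.sorted pr.2 (fun x => x) false).drop 1)

theorem round_eq_flat (R : List (List Int)) (act : List Bool)
    (st : List (Option Int) × List Nat) :
    pvRound R (pvBuild st.1 act) st = (pvLosers st.1 act).foldl (pvAdvance R) st := by
  rw [pvRound, pvLosers]
  exact foldl_groups_eq_flat R _ st

theorem losers_eq (fg : List (Option Int)) (act : List Bool) :
    pvLosers fg act = (pvBuild fg act).keys.flatMap (fun g =>
      if (pvVal fg act g).length ≤ 1 then ([] : List Int) else (pvVal fg act g).drop 1) := by
  rw [pvLosers, pvBuild_items, List.flatMap_map]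
  congr 1
  funext g
  rw [pvBuild_getD]
  show (if (pvVal fg act g).length ≤ 1 then ([] : List Int)
      else (PySem.List.sorted (pvVal fg act g) (fun x => x) false).drop 1) = _
  rw [pvVal_sorted]

theorem mem_losers (fg : List (Option Int)) (act : List Bool) (l : Int)
    (h : l ∈ pvLosers fg act) :
    ∃ g : Int, 1 < (pvVal fg act g).length ∧ l ∈ (pvVal fg act g).drop 1 := by
  rw [losers_eq, List.mem_flatMap] at h
  obtain ⟨g, _, hmem⟩ := h
  by_cases hlen : (pvVal fg act g).length ≤ 1
  · rw [if_pos hlen] at hmem; simp at hmem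
  · rw [if_neg hlen] at hmem
    exact ⟨g, by omega, hmem⟩

theorem nodup_losers (fg : List (Option Int)) (act : List Bool) :
    (pvLosers fg act).Nodup := by
  rw [losers_eq]
  apply nodup_flatMap_aux
  · intro g _
    by_cases hlen : (pvVal fg act g).length ≤ 1
    · rw [if_pos hlen]; exact List.nodup_nil
    · rw [if_neg hlen]
      exact (((pvVal_pairwise fg act g).sublist (List.drop_sublist 1 _)).imp
        (fun h => ne_of_lt h))
  · have hnd : (pvBuild fg act).keys.Pairwise (· ≠ ·) := pvBuild_nodup_keys fg act
    refine hnd.imp ?_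
    intro g g' hne b hb hb'
    apply hne
    · have hbg : b ∈ pvVal fg act g := by
        by_cases hlen : (pvVal fg act g).length ≤ 1
        · rw [if_pos hlen] at hb; simp at hb
        · rw [if_neg hlen] at hb; exact List.mem_of_mem_drop hb
      have hbg' : b ∈ pvVal fg act g' := by
        by_cases hlen : (pvVal fg act g').length ≤ 1
        · rw [if_pos hlen] at hb'; simp at hb'
        · rw [if_neg hlen] at hb'; exact List.mem_of_mem_drop hb'
      exact pvVal_key_unique fg act g g' b hbg hbg'

theorem losers_not_head (fg : List (Option Int)) (act : List Bool) (g : Int)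
    (a0 : Int) (rest : List Int) (hv : pvVal fg act g = a0 :: rest) :
    ¬ a0 ∈ pvLosers fg act := by
  intro hmem
  obtain ⟨g', hlen', hdrop'⟩ := mem_losers fg act a0 hmem
  have ha0g : a0 ∈ pvVal fg act g := by rw [hv]; exact List.mem_cons_self
  have ha0g' : a0 ∈ pvVal fg act g' := List.mem_of_mem_drop hdrop'
  have : g = g' := pvVal_key_unique fg act g g' a0 ha0g ha0g'
  subst this
  rw [hv] at hdrop'
  have hp := pvVal_pairwise fg act g
  rw [hv, List.pairwise_cons] at hp
  exact lt_irrefl a0 (hp.1 a0 (by simpa using hdrop'))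

theorem losers_witness (fg : List (Option Int)) (act : List Bool) (l : Int)
    (h : l ∈ pvLosers fg act) :
    ∃ (i j : Nat) (g : Int), l = (i : Int) ∧ j < i ∧ ¬((j : Int) ∈ pvLosers fg act) ∧
      act.getD i false = true ∧ act.getD j false = true ∧
      fg.getD i none = some g ∧ g ≠ 0 ∧ fg.getD j none = some g := by
  obtain ⟨g, hlen, hdrop⟩ := mem_losers fg act l h
  cases hv : pvVal fg act g with
  | nil => rw [hv] at hlen; simp at hlen
  | cons a0 rest =>
    rw [hv] at hdrop
    have hlmem : l ∈ pvVal fg act g := by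
      rw [hv]; exact List.mem_cons_of_mem _ (by simpa using hdrop)
    have ha0mem : a0 ∈ pvVal fg act g := by rw [hv]; exact List.mem_cons_self
    obtain ⟨i, hi, rfl, hfgi, hacti, hg0⟩ := mem_pvVal_facts fg act g l hlmem
    obtain ⟨j, hj, ha0, hfgj, hactj, _⟩ := mem_pvVal_facts fg act g a0 ha0mem
    have hp := pvVal_pairwise fg act g
    rw [hv, List.pairwise_cons] at hp
    have hlt : a0 < (i : Int) := hp.1 _ (by simpa using hdrop)
    rw [ha0] at hlt
    have hji : j < i := by exact_mod_cast hlt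
    refine ⟨i, j, g, rfl, hji, ?_, hacti, hactj, hfgi, hg0, hfgj⟩
    rw [← ha0]
    exact losers_not_head fg act g a0 rest hv

theorem conflict_losers_ne_nil (fg : List (Option Int)) (act : List Bool)
    (hconf : (pvBuild fg act).values.any (fun lst => decide (1 < lst.length)) = true) :
    pvLosers fg act ≠ [] := by
  rw [List.any_eq_true] at hconf
  obtain ⟨v, hv, hlen⟩ := hconf
  rw [PySem.Dict.values] at hv
  rw [List.mem_map] at hv
  obtain ⟨pr, hpr, rfl⟩ := hv
  rw [pvBuild_items, List.mem_map] at hpr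
  obtain ⟨g, hg, rfl⟩ := hpr
  rw [pvBuild_getD] at hlen
  rw [decide_eq_true_iff] at hlen
  have hlen' : 1 < (pvVal fg act g).length := hlen
  cases hv2 : pvVal fg act g with
  | nil => rw [hv2] at hlen'; simp at hlen'
  | cons a0 rest =>
    cases rest with
    | nil => rw [hv2] at hlen'; simp at hlen'
    | cons b rest' =>
      apply List.ne_nil_of_mem (a := b)
      rw [losers_eq, List.mem_flatMap]
      refine ⟨g, hg, ?_⟩
      have hle : ¬ (pvVal fg act g).length ≤ 1 := by omega
      rw [if_neg hle, hv2]
      simp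

theorem no_conflict_distinct (fg : List (Option Int)) (act : List Bool)
    (hnc : (pvBuild fg act).values.any (fun lst => decide (1 < lst.length)) = false)
    (i j : Nat) (g : Int) (hij : i ≠ j)
    (hi : i < fg.length) (hj : j < fg.length)
    (hacti : act.getD i false = true) (hactj : act.getD j false = true)
    (hfi : fg.getD i none = some g) (hg0 : g ≠ 0) (hfj : fg.getD j none = some g) : False := by
  have hpi : ((i : Int)) ∈ pvVal fg act g := by
    rw [mem_pvVal, mem_pvPairs]
    exact ⟨i, hi, rfl, hfi, hacti, hg0⟩
  have hpj : ((j : Int)) ∈ pvVal fg act g := by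
    rw [mem_pvVal, mem_pvPairs]
    exact ⟨j, hj, rfl, hfj, hactj, hg0⟩
  have hgk : g ∈ (pvBuild fg act).keys := by
    rw [pvBuild_keys, PySem.Set.mem_ofList, List.mem_map]
    exact ⟨(g, (i : Int)), (mem_pvVal fg act g _).mp hpi, rfl⟩
  have hvmem : pvVal fg act g ∈ (pvBuild fg act).values := by
    rw [PySem.Dict.values, pvBuild_items, List.map_map, List.mem_map]
    exact ⟨g, hgk, by simp [pvBuild_getD, pvVal]⟩
  rw [List.any_eq_false] at hnc
  have h2 := hnc _ hvmem
  rw [decide_eq_true_iff] at h2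
  have hne : (i : Int) ≠ (j : Int) := fun h => hij (by exact_mod_cast h)
  exact h2 (one_lt_length_of_two_mem _ _ _ hpi hpj hne)

theorem final_state_eq (R : List (List Int)) (act : List Bool)
    (st : List (Option Int) × List Nat) (hInv : pvInv R act st)
    (hnc : (pvBuild st.1 act).values.any (fun lst => decide (1 < lst.length)) = false) :
    st.1 = (List.range R.length).map (sdOut R act) := by
  obtain ⟨hl1, hl2, hple, hfg, hinact, hskip⟩ := hInv
  have key : ∀ i : Nat, i < R.length → st.1.getD i none = sdOut R act i := by
    intro i
    induction i using Nat.strong_induction_on with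
    | _ i ih =>
      intro hi
      by_cases hact : act.getD i false = true
      · have hout : sdOut R act i = pvScan (sdClaimed R act i) (R.getD i []) := by
          rw [sdOut, if_pos hact]
        rw [hout,
          pvScan_drop (sdClaimed R act i) (st.2.getD i 0) (R.getD i []) (hskip i hact) (hple i)]
        have hgoal := hfg i hi
        by_cases hlt : st.2.getD i 0 < (R.getD i []).length
        · rw [List.drop_eq_getElem_cons hlt, pvScan_cons]
          rw [← List.getD_eq_getElem (R.getD i []) 0 hlt]
          have hsome : st.1.getD i none = some ((R.getD i []).getD (st.2.getD i 0) 0) := by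
            rw [hgoal, pvGoalAt, if_pos hlt]
          by_cases hg0 : (R.getD i []).getD (st.2.getD i 0) 0 = 0
          · rw [if_pos (Or.inl hg0)]
            exact hsome
          · have hnot : ¬ (R.getD i []).getD (st.2.getD i 0) 0 ∈ sdClaimed R act i := by
              intro hmem
              rw [mem_sdClaimed_iff] at hmem
              obtain ⟨j, hji, hactj, houtj, _⟩ := hmem
              have hj : j < R.length := by omega
              have hjv := ih j hji hj
              rw [houtj] at hjv
              exact no_conflict_distinct st.1 act hnc i j _ (by omega) (by omega) (by omega)
                hact hactj hsome hg0 hjv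
            rw [if_pos (Or.inr hnot)]
            exact hsome
        · have hpos : st.2.getD i 0 = (R.getD i []).length := by
            have := hple i; omega
          rw [hpos, List.drop_length]
          rw [hgoal, pvGoalAt, if_neg hlt]
          rfl
      · have hact' : act.getD i false = false := by simpa using hact
        rw [sdOut, hact']
        rw [if_neg (by simp)]
        rw [hfg i hi, pvGoalAt, hinact i hact']
        exact (head?_eq_getD _ 0).symm
  apply List.ext_getElem
  · rw [hl1]; simp
  · intro i h1 h2
    have hkey := key i (by rw [← hl1]; exact h1)
    rw [← List.getD_eq_getElem st.1 none h1, hkey]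
    simp

theorem round_preserves (R : List (List Int)) (act : List Bool)
    (st : List (Option Int) × List Nat) (hInv : pvInv R act st)
    (hconf : (pvBuild st.1 act).values.any (fun lst => decide (1 < lst.length)) = true) :
    pvInv R act (pvRound R (pvBuild st.1 act) st) ∧
      pvMeasure R (pvRound R (pvBuild st.1 act) st).2 < pvMeasure R st.2 := by
  rw [round_eq_flat]
  have hrun := run_losers R act (pvLosers st.1 act) st hInv (nodup_losers st.1 act)
    (fun l hl => losers_witness st.1 act l hl)
  exact ⟨hrun.1, hrun.2.2 (conflict_losers_ne_nil st.1 act hconf)⟩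

theorem loopA_correct' (R : List (List Int)) (act : List Bool) :
    ∀ (fuel : Nat) (st : List (Option Int) × List Nat), pvInv R act st →
      pvMeasure R st.2 < fuel →
      pvLoopA R act fuel st = (List.range R.length).map (sdOut R act) := by
  intro fuel
  induction fuel with
  | zero => intro st _ h; omega
  | succ f ih =>
    intro st hInv hμ
    rw [pvLoopA]
    cases hconf : (pvBuild st.1 act).values.any (fun lst => decide (1 < lst.length)) with
    | false =>
      simp only [Bool.false_eq_true, if_false]
      exact final_state_eq R act st hInv hconf
    | true =>
      simp only [if_true]
      have hr := round_preserves R act st hInv hconf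
      exact ih _ hr.1 (by omega)

theorem getD_map_const_zero (R : List (List Int)) (i : Nat) :
    (R.map (fun _ => (0 : Nat))).getD i 0 = 0 := by
  by_cases h : i < R.length
  · simp [List.getD, h]
  · rw [List.getD_eq_default]
    rw [List.length_map]; omega

theorem init_inv (R : List (List Int)) (act : List Bool) :
    pvInv R act (R.map (fun rank => rank.head?), R.map (fun _ => 0)) := by
  refine ⟨by simp, by simp, ?_, ?_, ?_, ?_⟩
  · intro i
    rw [getD_map_const_zero]; omega
  · intro i hi
    show (R.map (fun rank => rank.head?)).getD i none = _
    rw [pvGoalAt, getD_map_const_zero]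
    have : (R.map (fun rank => rank.head?)).getD i none = (R.getD i []).head? := by
      rw [List.getD_eq_getElem _ _ (by rw [List.length_map]; exact hi), List.getElem_map]
      rw [List.getD_eq_getElem _ _ hi]
    rw [this, head?_eq_getD _ (0 : Int)]
  · intro i _
    exact getD_map_const_zero R i
  · intro i _ k hk
    rw [getD_map_const_zero] at hk
    omega

theorem init_measure (R : List (List Int)) :
    pvMeasure R (R.map (fun _ => 0)) = (R.map List.length).sum := by
  rw [pvMeasure]
  congr 1
  apply List.ext_getElem
  · simp
  · intro i h1 h2
    simp only [List.getElem_map, List.getElem_range]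
    rw [getD_map_const_zero, List.getD_eq_getElem _ _ (by simpa using h2)]
    omega

-- ===== VERDICT (by name: the statement is the Claim_ definition above) =====
theorem resolve_conflicts_spec : Claim_equal_resolve_conflicts := by
  intro R act _ _
  show resolve_conflicts R act = resolve_conflicts_alt R act
  rw [alt_eq_map_sdOut, resolve_conflicts]
  apply loopA_correct'
  · exact init_inv R act
  · show pvMeasure R (R.map (fun _ => 0)) < _
    rw [init_measure]
    omega
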